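-- pv_equiv track=rewrite | github.com/dickonfell/Caesar-Vignere-Encoder-Decoder | vignere.py | vencoder
-- ===== SOURCE A (Python) =====
-- def vencoder(message,keyword):
--     # shifts each letter of a message to the right along the alphabet
--     # by the index of the corresponding letter of the keyword phrase in the alphabet.
--
--     alphabet = "abcdefghijklmnopqrstuvwxyz"
--     output = ""
--
--     i = 0
--     j = 0 # counts length of keyword phrase
--     while i < len(message):
--
--         if message[i] in alphabet:
--             # shift message[i] to the right by the index of keyword_phrase[j] in alphabet
--             location_in_alphabet = alphabet.find(message[i])
--             shift = alphabet.find(keyword[j % len(keyword)])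
--             output += alphabet[(location_in_alphabet+shift) % 26]
--             j += 1
--         else:
--             output += message[i]
--
--         i+= 1
--
--     return output
-- ===== SOURCE B (Python) =====
-- def vencoder(message, keyword):
--     # Two-pass decomposition: encrypt the letters as a sequence, then
--     # weave them back between the non-letter characters.
--     alphabet = "abcdefghijklmnopqrstuvwxyz"
--     letters = [c for c in message if c in alphabet]
--     encrypted = [
--         alphabet[(alphabet.find(c) + alphabet.find(keyword[k % len(keyword)])) % 26]
--         for k, c in enumerate(letters)
--     ]
--     it = iter(encrypted)
--     return "".join(next(it) if c in alphabet else c for c in message)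
-- ===== Notes on version B (the rewrite author's own statement) =====
-- stated objective: alternative
-- what changed: Replaced the single while-loop accumulating a string with += and a key counter by a two-pass decomposition: filter out the letters, encrypt them as an enumerated sequence, then weave the encrypted letters back between the non-letter characters with one join.
import Mathlib
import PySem

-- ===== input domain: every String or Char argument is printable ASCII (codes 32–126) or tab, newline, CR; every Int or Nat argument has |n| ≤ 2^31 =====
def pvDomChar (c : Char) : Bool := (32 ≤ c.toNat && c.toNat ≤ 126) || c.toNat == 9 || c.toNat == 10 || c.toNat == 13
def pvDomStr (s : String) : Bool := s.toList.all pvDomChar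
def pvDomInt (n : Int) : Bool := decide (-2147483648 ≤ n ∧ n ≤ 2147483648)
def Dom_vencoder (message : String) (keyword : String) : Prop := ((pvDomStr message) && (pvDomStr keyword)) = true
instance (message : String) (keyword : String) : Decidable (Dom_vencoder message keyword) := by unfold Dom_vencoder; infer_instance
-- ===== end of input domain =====

-- B is an alternative two-pass decomposition (encrypt the letters as a sequence, then weave
-- them back between the non-letters); same cost, proved to return A's exact value.

-- shared constants/helpers (the module-level alphabet and str.find on it)
def pvAlpha : List Char :=
  ['a','b','c','d','e','f','g','h','i','j','k','l','m','n','o','p','q','r','s','t','u','v','w','x','y','z']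

-- alphabet.find(c) : index or -1 (c is a single char, so substring search = membership)
def pvFindA (c : Char) : Int :=
  match pvAlpha.idxOf? c with
  | some n => (n : Int)
  | none => -1

-- ===== PORT A =====
-- the while-loop of A: i walks message, j counts letters seen so far
def vencoderLoop (kw : List Char) : List Char → Nat → List Char
  | [], _ => []
  | c :: rest, j =>
    if c ∈ pvAlpha then
      let loc := pvFindA c
      let shift := pvFindA (kw.getD (j % kw.length) ' ')
      pvAlpha.getD (PySem.Int.mod (loc + shift) 26).toNat ' ' :: vencoderLoop kw rest (j + 1)
    else
      c :: vencoderLoop kw rest j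

def vencoder (message : String) (keyword : String) : String :=
  String.mk (vencoderLoop keyword.toList message.toList 0)

-- ===== PORT B =====
-- encryption of the k-th letter c of the letter sequence
def pvEncChar (kw : List Char) (k : Nat) (c : Char) : Char :=
  pvAlpha.getD (PySem.Int.mod (pvFindA c + pvFindA (kw.getD (k % kw.length) ' ')) 26).toNat ' '

-- second pass of B: emit the next encrypted letter at each letter position, else the original char
def pvMergeBack : List Char → List Char → List Char
  | [], _ => []
  | c :: rest, enc =>
    if c ∈ pvAlpha then enc.headD ' ' :: pvMergeBack rest enc.tail
    else c :: pvMergeBack rest enc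

def vencoder_alt (message : String) (keyword : String) : String :=
  let letters := message.toList.filter (· ∈ pvAlpha)
  let encrypted := (letters.zipIdx).map (fun p => pvEncChar keyword.toList p.2 p.1)
  String.mk (pvMergeBack message.toList encrypted)

-- ===== PRECONDITION & SPEC =====
-- Pre_ excludes exactly the inputs where A raises ZeroDivisionError:
-- an empty keyword together with a message containing a lowercase letter.
def Pre_vencoder (message : String) (keyword : String) : Prop :=
  keyword.toList ≠ [] ∨ message.toList.all (fun c => decide (c ∉ pvAlpha)) = true
instance (message : String) (keyword : String) : Decidable (Pre_vencoder message keyword) := by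
  unfold Pre_vencoder; infer_instance

def pvWitness_vencoder : String × String := ("attack at dawn!", "key")

def Spec_vencoder (message : String) (keyword : String) (out : String) : Prop := out = vencoder_alt message keyword
instance (message : String) (keyword : String) (out : String) : Decidable (Spec_vencoder message keyword out) := by unfold Spec_vencoder; infer_instance

-- ===== CLAIM (what is proved, stated in full; the proofs are below) =====
def Claim_equal_vencoder : Prop := ∀ (message : String) (keyword : String), Dom_vencoder message keyword → Pre_vencoder message keyword → Spec_vencoder message keyword (vencoder message keyword)

-- ===== LEMMAS AND PROOFS =====
-- loop invariant: A's loop from letter-counter j equals B's merge of the letters enumerated from j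
theorem vencoderLoop_eq_merge (kw : List Char) (msg : List Char) (j : Nat) :
    vencoderLoop kw msg j =
      pvMergeBack msg (((msg.filter (· ∈ pvAlpha)).zipIdx j).map (fun p => pvEncChar kw p.2 p.1)) := by
  induction msg generalizing j with
  | nil => rfl
  | cons c rest ih =>
    by_cases hc : c ∈ pvAlpha
    · simp [vencoderLoop, pvMergeBack, hc, pvEncChar, ih]
    · simp [vencoderLoop, pvMergeBack, hc, ih]

-- ===== VERDICT (by name: the statement is the Claim_ definition above) =====
theorem vencoder_spec : Claim_equal_vencoder := by
  intro message keyword _ _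
  unfold Spec_vencoder vencoder vencoder_alt
  rw [vencoderLoop_eq_merge]
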